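-- pv_equiv track=rewrite | github.com/chiarapascal/lpgcdm | godet_chiara_akhras_sara.py | create_liste_map
-- ===== SOURCE A (Python) =====
-- def create_liste_map(map:list[str])-> list[list] :
--     liste = []
--     for i in range(0,len(map)) :
--         tmp = map[i].replace('o', '0')
--         tmp = tmp.replace('.', '1')
--         tmp = tmp.replace('\n', '')
--         tmp = tmp.replace(' ', '')
--         liste.append(tmp)
--
--     return liste
-- ===== SOURCE B (Python) =====
-- def create_liste_map(map: list[str]) -> list[list]:
--     mapping = {'o': '0', '.': '1'}
--     out = []
--     for line in map:
--         buf = []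
--         for ch in line:
--             if ch == ' ' or ch == '\n':
--                 continue
--             buf.append(mapping.get(ch, ch))
--         out.append(''.join(buf))
--     return out
-- ===== Notes on version B (the rewrite author's own statement) =====
-- stated objective: simpler
-- what changed: Replaces four sequential full-line .replace scans per line with one character-by-character pass using a lookup table, skipping ' '/'\n' and mapping 'o'->'0', '.'->'1'.
import Mathlib
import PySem

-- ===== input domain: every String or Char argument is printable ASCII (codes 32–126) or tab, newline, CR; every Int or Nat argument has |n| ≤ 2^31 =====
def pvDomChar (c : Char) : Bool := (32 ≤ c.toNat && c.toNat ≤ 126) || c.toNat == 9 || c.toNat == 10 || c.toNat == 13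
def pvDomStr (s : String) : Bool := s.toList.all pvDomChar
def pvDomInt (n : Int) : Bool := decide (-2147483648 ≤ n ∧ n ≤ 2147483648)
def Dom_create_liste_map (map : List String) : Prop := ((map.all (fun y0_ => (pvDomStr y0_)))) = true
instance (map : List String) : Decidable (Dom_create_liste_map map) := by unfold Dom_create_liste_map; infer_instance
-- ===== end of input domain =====

-- B replaces A's four sequential full-line .replace scans per line by one
-- character-by-character pass with a lookup table (objective: simpler).

-- ===== PORT A =====
def create_liste_map (map : List String) : List String :=
  (PySem.List.pyRange 0 (PySem.List.len map)).foldl (fun liste i =>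
    let tmp := PySem.Str.replace (PySem.List.pyGetD map i "") "o" "0"
    let tmp := PySem.Str.replace tmp "." "1"
    let tmp := PySem.Str.replace tmp "\n" ""
    let tmp := PySem.Str.replace tmp " " ""
    liste ++ [tmp]) []

-- ===== PORT B =====
-- mapping.get(ch, ch) of Source B, the two-entry dict as an if-chain
def pvMapGet (c : Char) : Char :=
  if c = 'o' then '0' else if c = '.' then '1' else c

def create_liste_map_alt (map : List String) : List String :=
  map.foldl (fun out line =>
    let buf := line.toList.foldl (fun buf ch =>
      if ch = ' ' ∨ ch = '\n' then buf else buf ++ [pvMapGet ch]) []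
    out ++ [String.ofList buf]) []

-- ===== PRECONDITION & SPEC =====
def Spec_create_liste_map (map : List String) (out : List String) : Prop := out = create_liste_map_alt map
instance (map : List String) (out : List String) : Decidable (Spec_create_liste_map map out) := by unfold Spec_create_liste_map; infer_instance

-- ===== CLAIM (what is proved, stated in full; the proofs are below) =====
def Claim_equal_create_liste_map : Prop := ∀ (map : List String), Dom_create_liste_map map → Spec_create_liste_map map (create_liste_map map)

-- ===== LEMMAS AND PROOFS =====

-- single-character replace is a per-character flatMap
theorem replace_go_single (o : Char) (new : List Char) :
    ∀ (l : List Char) (fuel : Nat) (acc : List Char), l.length ≤ fuel →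
      PySem.Chars.replace.go [o] new fuel l acc =
        acc.reverse ++ l.flatMap (fun c => if c = o then new else [c]) := by
  intro l
  induction l with
  | nil =>
      intro fuel acc _
      cases fuel <;> simp [PySem.Chars.replace.go]
  | cons c t ih =>
      intro fuel acc h
      cases fuel with
      | zero => simp at h
      | succ n =>
          simp only [PySem.Chars.replace.go]
          by_cases hc : c = o
          · subst hc
            simp only [List.isPrefixOf, BEq.rfl, Bool.true_and,
              if_pos, List.length_cons] at *
            simp only [List.length_nil, Nat.zero_add, List.drop_succ_cons, List.drop_zero]
            rw [ih n (new.reverse ++ acc) (by omega)]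
            simp
          · have : [o].isPrefixOf (c :: t) = false := by
              simp [List.isPrefixOf]
              intro h'; exact absurd h'.symm hc
            rw [this]
            simp only [Bool.false_eq_true, if_false]
            rw [ih n (c :: acc) (by simpa using Nat.lt_succ_iff.mp (by simpa using h))]
            simp [hc]

theorem replace_single (s : List Char) (o : Char) (new : List Char) :
    PySem.Chars.replace s [o] new =
      s.flatMap (fun c => if c = o then new else [c]) := by
  simp only [PySem.Chars.replace, List.isEmpty, Bool.false_eq_true, if_false]
  exact replace_go_single o new s s.length [] (le_refl _)

-- one character through the four replace-flatMaps equals B's skip/lookup step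
theorem char_eq (c : Char) :
    ((if c = 'o' then ['0'] else [c]).flatMap
        (fun d => (if d = '.' then ['1'] else [d]).flatMap
          (fun e => (if e = '\n' then ([] : List Char) else [e]).flatMap
            (fun f => if f = ' ' then ([] : List Char) else [f])))) =
      (if c = ' ' ∨ c = '\n' then [] else [pvMapGet c]) := by
  by_cases h1 : c = 'o'
  · subst h1; simp [pvMapGet]
  · by_cases h2 : c = '.'
    · subst h2; simp [pvMapGet]
    · by_cases h3 : c = '\n'
      · subst h3; simp
      · by_cases h4 : c = ' '
        · subst h4; simp
        · simp [h1, h2, h3, h4, pvMapGet]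

-- the four chained replaces on one line equal B's single pass
theorem line_eq (s : String) :
    PySem.Str.replace (PySem.Str.replace (PySem.Str.replace
        (PySem.Str.replace s "o" "0") "." "1") "\n" "") " " "" =
      String.ofList (s.toList.foldl (fun buf ch =>
        if ch = ' ' ∨ ch = '\n' then buf else buf ++ [pvMapGet ch]) []) := by
  apply String.toList_inj.mp
  rw [String.toList_ofList]
  have hfold : s.toList.foldl (fun buf ch =>
      if ch = ' ' ∨ ch = '\n' then buf else buf ++ [pvMapGet ch]) [] =
      s.toList.flatMap (fun c => if c = ' ' ∨ c = '\n' then [] else [pvMapGet c]) := by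
    induction s.toList using List.reverseRecOn with
    | nil => simp
    | append_singleton t c ih =>
        rw [List.foldl_append, List.flatMap_append, ih]
        by_cases h : c = ' ' ∨ c = '\n' <;> simp [h]
  rw [hfold]
  simp only [PySem.Str.toList_replace]
  rw [show (" " : String).toList = [' '] from rfl,
      show ("\n" : String).toList = ['\n'] from rfl,
      show ("." : String).toList = ['.'] from rfl,
      show ("o" : String).toList = ['o'] from rfl,
      show ("0" : String).toList = ['0'] from rfl,
      show ("1" : String).toList = ['1'] from rfl,
      show ("" : String).toList = ([] : List Char) from rfl]
  rw [replace_single, replace_single, replace_single, replace_single]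
  rw [List.flatMap_assoc, List.flatMap_assoc]
  rw [List.flatMap_assoc]
  exact List.flatMap_congr (fun c _ => char_eq c)

-- ===== VERDICT (by name: the statement is the Claim_ definition above) =====
theorem create_liste_map_spec : Claim_equal_create_liste_map := by
  intro map _
  unfold Spec_create_liste_map create_liste_map create_liste_map_alt
  rw [PySem.List.foldl_pyRange_pyGetD map ""
      (fun liste x => liste ++ [PySem.Str.replace (PySem.Str.replace (PySem.Str.replace
        (PySem.Str.replace x "o" "0") "." "1") "\n" "") " " ""]) [] (le_refl 0)]
  simp only [Int.toNat_zero, List.drop_zero]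
  rw [PySem.List.foldl_append_eq_flatMap, PySem.List.foldl_append_eq_flatMap]
  simp only [List.nil_append]
  exact List.flatMap_congr (fun line _ => by rw [line_eq])
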